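-- pv_equiv track=rewrite | github.com/Smoke666D/LUA_SCRIPT | UTIL/luamin.py | initAvailableVarList
-- ===== SOURCE A (Python) =====
-- minNamesList = ['a', 'b', 'c', 'd', 'e', 'f', 'g', 'h', 'i', 'j',
--                 'k', 'l', 'm', 'n', 'o', 'p', 'q', 'r', 's', 't',
--                 'u', 'v', 'w', 'x', 'y', 'z'];
--
-- reservedVars    = [];
--
-- def makeNewMinName ( index ):
--   base   = len( minNamesList );
--   number = index;
--   result = [];
--   out    = '';
--   if number == 0:
--     result.append( 0 );
--   else:
--     while number != 0:
--       result.insert( 0, number % base );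
--       number //= base;
--   for i in range( len( result ) ):
--     if len( result ) > 1 and i != ( len( result ) - 1):
--       ri = result[i] - 1;
--     else:
--       ri = result[i];
--     out += minNamesList[ ri ];
--   return out;
--
-- def isNameReserved ( name ):
--   res = False;
--   for reserv in reservedVars:
--     if name == reserv:
--       res = True;
--       break;
--   return res;
--
-- def initAvailableVarList ( size ):
--   out = [];
--   counter = 0;
--   for i in range( size ):
--     while isNameReserved( makeNewMinName( counter ) ) == True:
--       counter += 1;
--     out.append( makeNewMinName( counter ) );
--     counter += 1;
--   return out;
-- ===== SOURCE B (Python) =====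
-- ALPHA = 'abcdefghijklmnopqrstuvwxyz'
--
-- def _prefix(m):
--     s = ''
--     while m:
--         s = ALPHA[(m % 26 - 1) % 26] + s
--         m //= 26
--     return s
--
-- def initAvailableVarList(size):
--     return [_prefix(i // 26) + ALPHA[i % 26] for i in range(size)]
-- ===== Notes on version B (the rewrite author's own statement) =====
-- stated objective: simpler
-- what changed: Replaces A's nested loops (outer for with an inner reserved-skip while, plus makeNewMinName's digit-list build with insert(0,..) followed by an index-conditional rendering pass) with a single comprehension that builds each name directly as a closed-form prefix of decremented base-26 digits plus the final letter, dropping the reserved-name scan since reservedVars is empty.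
import Mathlib
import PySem

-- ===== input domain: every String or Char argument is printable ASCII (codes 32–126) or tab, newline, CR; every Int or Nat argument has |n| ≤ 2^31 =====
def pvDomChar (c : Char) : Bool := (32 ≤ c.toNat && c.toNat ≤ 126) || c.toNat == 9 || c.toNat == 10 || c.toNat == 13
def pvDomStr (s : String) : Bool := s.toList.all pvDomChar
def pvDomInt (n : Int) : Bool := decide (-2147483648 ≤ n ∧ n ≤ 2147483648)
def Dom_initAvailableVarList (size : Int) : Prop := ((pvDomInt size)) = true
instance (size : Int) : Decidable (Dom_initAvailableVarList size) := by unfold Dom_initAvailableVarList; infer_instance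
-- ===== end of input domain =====

-- B replaces A's nested loops and per-call digit-list rebuild with a direct closed-form name
-- builder (prefix of decremented base-26 digits + last letter) mapped over the range: simpler.

-- ===== PORT A =====
def minNamesList : List String :=
  ["a","b","c","d","e","f","g","h","i","j","k","l","m","n","o","p","q","r","s","t","u","v","w","x","y","z"]

def reservedVars : List String := []

-- while number != 0 loop of makeNewMinName; number ≥ 0 in every reachable call
-- ('number ≤ 0' is a totalizing guard: Python diverges for negative number, never reached)
def pvWhileDigits (number : Int) (result : List Int) : List Int :=
  if h : number ≤ 0 then result
  else pvWhileDigits (PySem.Int.floordiv number 26) (PySem.Int.mod number 26 :: result)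
termination_by number.toNat
decreasing_by
  have h1 : PySem.Int.floordiv number 26 = number / 26 :=
    PySem.Int.floordiv_eq_ediv_of_pos (by norm_num)
  rw [h1]
  omega

def makeNewMinNameA (index : Int) : String :=
  let result : List Int := if index = 0 then [0] else pvWhileDigits index []
  (List.range result.length).foldl
    (fun out i =>
      let ri : Int :=
        if result.length > 1 ∧ i ≠ result.length - 1 then result.getD i 0 - 1 else result.getD i 0
      out ++ ((PySem.List.pyGet? minNamesList ri).getD "")) ""

def isNameReservedLoop (name : String) : List String → Bool
  | [] => false
  | r :: rs => if name == r then true else isNameReservedLoop name rs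

def isNameReservedA (name : String) : Bool := isNameReservedLoop name reservedVars

-- inner while: skips reserved names; reservedVars = [] so the body is unreachable
def pvSkipWhile (counter : Int) : Int :=
  if h : isNameReservedA (makeNewMinNameA counter) = true then pvSkipWhile (counter + 1)
  else counter
termination_by 0
decreasing_by simp [isNameReservedA, reservedVars, isNameReservedLoop] at h

def initAvailableVarList (size : Int) : List String :=
  ((PySem.List.pyRange 0 size 1).foldl
    (fun st _i =>
      let counter := pvSkipWhile st.2
      (st.1 ++ [makeNewMinNameA counter], counter + 1))
    (([] : List String), (0 : Int))).1

-- ===== PORT B =====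
def pvAlpha : String := "abcdefghijklmnopqrstuvwxyz"

-- while m loop of _prefix; m ≥ 0 in every reachable call ('m ≤ 0' is a totalizing guard:
-- Python diverges for negative m, never reached)
def pvPrefixLoop (m : Int) (s : String) : String :=
  if h : m ≤ 0 then s
  else
    pvPrefixLoop (PySem.Int.floordiv m 26)
      (String.singleton ((PySem.Str.pyGet? pvAlpha (PySem.Int.mod (PySem.Int.mod m 26 - 1) 26)).getD 'a') ++ s)
termination_by m.toNat
decreasing_by
  have h1 : PySem.Int.floordiv m 26 = m / 26 :=
    PySem.Int.floordiv_eq_ediv_of_pos (by norm_num)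
  rw [h1]; omega

def initAvailableVarList_alt (size : Int) : List String :=
  (PySem.List.pyRange 0 size 1).map (fun i =>
    pvPrefixLoop (PySem.Int.floordiv i 26) "" ++
      String.singleton ((PySem.Str.pyGet? pvAlpha (PySem.Int.mod i 26)).getD 'a'))

-- ===== PRECONDITION & SPEC =====
def Spec_initAvailableVarList (size : Int) (out : List String) : Prop := out = initAvailableVarList_alt size
instance (size : Int) (out : List String) : Decidable (Spec_initAvailableVarList size out) := by unfold Spec_initAvailableVarList; infer_instance

-- ===== CLAIM (what is proved, stated in full; the proofs are below) =====
def Claim_equal_initAvailableVarList : Prop := ∀ (size : Int), Dom_initAvailableVarList size → Spec_initAvailableVarList size (initAvailableVarList size)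

-- ===== LEMMAS AND PROOFS =====
theorem skip_eq (c : Int) : pvSkipWhile c = c := by
  rw [pvSkipWhile]
  simp [isNameReservedA, reservedVars, isNameReservedLoop]

def pvDigits (n : Nat) : List Int :=
  if n = 0 then [] else pvDigits (n / 26) ++ [((n % 26 : Nat) : Int)]
termination_by n
decreasing_by omega

theorem whileDigits_eq (n : Nat) : ∀ (acc : List Int), pvWhileDigits (n : Int) acc = pvDigits n ++ acc := by
  induction n using Nat.strong_induction_on with
  | _ n ih =>
    intro acc
    rw [pvWhileDigits, pvDigits]
    by_cases h : n = 0
    · subst h; simp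
    · have hpos : ¬ ((n : Int) ≤ 0) := by omega
      have hfd : PySem.Int.floordiv (n : Int) 26 = ((n / 26 : Nat) : Int) := by
        exact_mod_cast PySem.Int.floordiv_natCast n 26
      have hmd : PySem.Int.mod (n : Int) 26 = ((n % 26 : Nat) : Int) := by
        exact_mod_cast PySem.Int.mod_natCast n 26
      simp only [h, hpos, if_neg, dif_neg, not_false_iff, hfd, hmd]
      rw [ih (n / 26) (by omega)]
      simp

theorem digits_bounds (n : Nat) : ∀ d ∈ pvDigits n, 0 ≤ d ∧ d < 26 := by
  induction n using Nat.strong_induction_on with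
  | _ n ih =>
    intro d hd
    rw [pvDigits] at hd
    by_cases h : n = 0
    · simp [h] at hd
    · rw [if_neg h] at hd
      rcases List.mem_append.mp hd with h1 | h1
      · exact ih (n / 26) (by omega) d h1
      · simp at h1; subst h1; omega

def letA (ri : Int) : String := (PySem.List.pyGet? minNamesList ri).getD ""
def letB (j : Int) : String := String.singleton ((PySem.Str.pyGet? pvAlpha j).getD 'a')

theorem letAB_pref (e : Int) (h0 : 0 ≤ e) (h1 : e < 26) :
    letA (e - 1) = letB (PySem.Int.mod (e - 1) 26) := by
  interval_cases e <;> rfl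

theorem letAB_last (e : Int) (h0 : 0 ≤ e) (h1 : e < 26) : letA e = letB e := by
  interval_cases e <;> rfl

-- generic fold-append-over-naturals to flatten
theorem foldl_str (g : Nat → String) (l : List Nat) : ∀ (s : String),
    (l.foldl (fun out i => out ++ g i) s).toList
      = s.toList ++ (l.map fun i => (g i).toList).flatten := by
  induction l with
  | nil => intro s; simp
  | cons a t ih => intro s; simp [ih, String.toList_append]

theorem map_getD_range {α β : Type} (xs : List α) (f : α → β) (d : α) :
    (List.range xs.length).map (fun i => f (xs.getD i d)) = xs.map f := by
  apply List.ext_getElem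
  · simp
  · intro i h1 h2
    simp only [List.length_map, List.length_range] at h1
    simp [List.getD_eq_getElem, h1]

-- render lemma: makeNewMinNameA's for-loop on a digit list es ++ [d]
theorem renderA_eq (es : List Int) (d : Int) :
    ((List.range (es ++ [d]).length).foldl
      (fun out i =>
        let ri : Int :=
          if (es ++ [d]).length > 1 ∧ i ≠ (es ++ [d]).length - 1 then (es ++ [d]).getD i 0 - 1
          else (es ++ [d]).getD i 0
        out ++ letA ri) "").toList
      = (es.map fun e => (letA (e - 1)).toList).flatten ++ (letA d).toList := by
  rw [foldl_str]
  rcases es with _ | ⟨e, es'⟩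
  · simp
  · set L := (e :: es') ++ [d] with hL
    have hlen : L.length = es'.length + 2 := by simp [hL]
    rw [hlen, List.range_succ]
    simp only [List.map_append, List.map_cons, List.map_nil, List.flatten_append]
    have hlastD : L.getD (es'.length + 1) 0 = d := by
      simp [hL, List.getD_eq_getElem?_getD]
    have hmap : List.map (fun i =>
          (letA (if es'.length + 2 > 1 ∧ i ≠ es'.length + 2 - 1 then L.getD i 0 - 1
            else L.getD i 0)).toList) (List.range (es'.length + 1))
        = List.map (fun i => (letA ((e :: es').getD i 0 - 1)).toList)
            (List.range (es'.length + 1)) := by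
      apply List.map_congr_left
      intro i hi
      rw [List.mem_range] at hi
      have h2 : ¬ (i = es'.length + 2 - 1) := by omega
      have h3 : L[i]? = (e :: es')[i]? := by
        rw [hL]
        exact List.getElem?_append_left (by simpa using hi)
      have h2' : ¬ i = es'.length + 1 := by omega
      simp only [List.getD_eq_getElem?_getD]
      rw [if_pos (by constructor <;> omega : es'.length + 2 > 1 ∧ i ≠ es'.length + 2 - 1), h3]
    rw [hmap]
    have hlen2 : es'.length + 1 = (e :: es').length := by simp
    rw [hlen2, map_getD_range (e :: es') (fun x => (letA (x - 1)).toList) 0]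
    have h5 : L[es'.length + 1]? = some d := by
      rw [hL, show es'.length + 1 = (e :: es').length from by simp]
      exact List.getElem?_concat_length
    rw [if_neg (by simp : ¬ (es'.length + 2 > 1 ∧ (e :: es').length ≠ es'.length + 2 - 1))]
    simp [List.getD_eq_getElem?_getD, h5]

theorem prefixLoop_eq (n : Nat) : ∀ (s : String),
    (pvPrefixLoop (n : Int) s).toList
      = ((pvDigits n).map fun e => (letB (PySem.Int.mod (e - 1) 26)).toList).flatten ++ s.toList := by
  induction n using Nat.strong_induction_on with
  | _ n ih =>
    intro s
    rw [pvPrefixLoop, pvDigits]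
    by_cases h : n = 0
    · subst h; simp
    · have hpos : ¬ ((n : Int) ≤ 0) := by omega
      have hfd : PySem.Int.floordiv (n : Int) 26 = ((n / 26 : Nat) : Int) := by
        exact_mod_cast PySem.Int.floordiv_natCast n 26
      have hmd : PySem.Int.mod (n : Int) 26 = ((n % 26 : Nat) : Int) := by
        exact_mod_cast PySem.Int.mod_natCast n 26
      simp only [h, hpos, dif_neg, not_false_iff, if_neg, hfd, hmd]
      rw [ih (n / 26) (by omega)]
      simp [letB, String.toList_append]

theorem nameAB (k : Nat) :
    makeNewMinNameA (k : Int)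
      = pvPrefixLoop (PySem.Int.floordiv (k : Int) 26) ""
          ++ letB (PySem.Int.mod (k : Int) 26) := by
  apply String.toList_inj.mp
  by_cases h : k = 0
  · subst h
    simp only [Nat.cast_zero]
    rw [pvPrefixLoop, dif_pos (by decide)]
    decide
  · have hfd : PySem.Int.floordiv (k : Int) 26 = ((k / 26 : Nat) : Int) := by
      exact_mod_cast PySem.Int.floordiv_natCast k 26
    have hmd : PySem.Int.mod (k : Int) 26 = ((k % 26 : Nat) : Int) := by
      exact_mod_cast PySem.Int.mod_natCast k 26
    have hk0 : ¬ ((k : Int) = 0) := by omega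
    have hres : pvWhileDigits (k : Int) [] = pvDigits (k / 26) ++ [((k % 26 : Nat) : Int)] := by
      rw [whileDigits_eq k []]
      rw [pvDigits, if_neg h]
      simp
    rw [makeNewMinNameA]
    simp only [hk0, if_neg, not_false_iff, hres]
    rw [show (fun (out : String) i =>
        out ++ (PySem.List.pyGet? minNamesList
          (if (pvDigits (k / 26) ++ [((k % 26 : Nat) : Int)]).length > 1 ∧
              i ≠ (pvDigits (k / 26) ++ [((k % 26 : Nat) : Int)]).length - 1
            then (pvDigits (k / 26) ++ [((k % 26 : Nat) : Int)]).getD i 0 - 1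
            else (pvDigits (k / 26) ++ [((k % 26 : Nat) : Int)]).getD i 0)).getD "")
      = (fun (out : String) i => out ++ letA
          (if (pvDigits (k / 26) ++ [((k % 26 : Nat) : Int)]).length > 1 ∧
              i ≠ (pvDigits (k / 26) ++ [((k % 26 : Nat) : Int)]).length - 1
            then (pvDigits (k / 26) ++ [((k % 26 : Nat) : Int)]).getD i 0 - 1
            else (pvDigits (k / 26) ++ [((k % 26 : Nat) : Int)]).getD i 0)) from rfl]
    rw [renderA_eq (pvDigits (k / 26)) ((k % 26 : Nat) : Int)]
    rw [hfd, hmd, String.toList_append, prefixLoop_eq (k / 26) ""]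
    have hmapeq : (pvDigits (k / 26)).map (fun e => (letA (e - 1)).toList)
        = (pvDigits (k / 26)).map (fun e => (letB (PySem.Int.mod (e - 1) 26)).toList) := by
      apply List.map_congr_left
      intro e he
      obtain ⟨h0, h1⟩ := digits_bounds (k / 26) e he
      rw [letAB_pref e h0 h1]
    have hlast : letA ((k % 26 : Nat) : Int) = letB ((k % 26 : Nat) : Int) := by
      apply letAB_last <;> [positivity; exact_mod_cast Nat.mod_lt k (by omega)]
    rw [hmapeq, hlast]
    simp

theorem foldA (l : List Int) : ∀ (out : List String) (c : Int),
    (l.foldl (fun (st : List String × Int) (_i : Int) =>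
        (st.1 ++ [makeNewMinNameA st.2], st.2 + 1)) (out, c))
      = (out ++ (List.range l.length).map (fun (j : Nat) => makeNewMinNameA (c + (j : Int))),
         (c + l.length : Int)) := by
  induction l with
  | nil => intro out c; simp
  | cons a t ih =>
    intro out c
    rw [List.foldl_cons, ih (out ++ [makeNewMinNameA c]) (c + 1)]
    simp only [Prod.mk.injEq]
    constructor
    · simp only [List.length_cons, List.range_succ_eq_map, List.map_cons, List.map_map]
      simp only [Nat.cast_zero, add_zero, List.append_assoc, List.singleton_append]
      congr 1
      congr 1
      apply List.map_congr_left
      intro j _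
      simp only [Function.comp_apply]
      congr 1
      push_cast
      ring
    · simp; ring

theorem equivMain (size : Int) : initAvailableVarList size = initAvailableVarList_alt size := by
  rw [initAvailableVarList, initAvailableVarList_alt, PySem.List.pyRange_one]
  simp only [skip_eq]
  rw [foldA]
  simp only [List.length_map, List.length_range, List.nil_append, List.map_map]
  apply List.map_congr_left
  intro j _
  simp only [Function.comp_apply, zero_add]
  exact nameAB j

-- ===== VERDICT (by name: the statement is the Claim_ definition above) =====
theorem initAvailableVarList_spec : Claim_equal_initAvailableVarList := by
  intro size _
  exact equivMain size
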